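-- pv_equiv track=rewrite | github.com/ananzeng/Tsenglians-_thesis_project | utils/imutils.py | large_rect
-- ===== SOURCE A (Python) =====
-- def large_rect(rect):
--     # find largest recteangles
--     large_area = 0
--     target = 0
--     for i in range(len(rect)):
--         area = rect[i][2]*rect[i][3]
--         if large_area < area:
--             large_area = area
--             target = i
--
--     x = rect[target][0]
--     y = rect[target][1]
--     w = rect[target][2]
--     h = rect[target][3]
--
--     return x, y, w, h
-- ===== SOURCE B (Python) =====
-- def large_rect(rect):
--     # sort-then-select: stable descending sort by area, take the top rectangle
--     s = sorted(rect, key=lambda r: r[2] * r[3], reverse=True)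
--     x, y, w, h = s[0][0], s[0][1], s[0][2], s[0][3]
--     return x, y, w, h
-- ===== Notes on version B (the rewrite author's own statement) =====
-- stated objective: alternative
-- what changed: replaces the indexed max-scan (running area + target index) by a stable descending sort on area followed by taking the first element
-- intended difference: on non-empty lists whose areas w*h are all <= 0 and whose first rectangle does not attain the maximal area, A returns rect[0] (its target=0 initialisation is never overwritten because it only updates on area > 0) while B returns the first rectangle of maximal area, which is the intended largest rectangle — e.g. on large_rect([(0, 0, 1, -1), (5, 5, 0, 0)]): A returns (0, 0, 1, -1), B returns (5, 5, 0, 0)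
import Mathlib
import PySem

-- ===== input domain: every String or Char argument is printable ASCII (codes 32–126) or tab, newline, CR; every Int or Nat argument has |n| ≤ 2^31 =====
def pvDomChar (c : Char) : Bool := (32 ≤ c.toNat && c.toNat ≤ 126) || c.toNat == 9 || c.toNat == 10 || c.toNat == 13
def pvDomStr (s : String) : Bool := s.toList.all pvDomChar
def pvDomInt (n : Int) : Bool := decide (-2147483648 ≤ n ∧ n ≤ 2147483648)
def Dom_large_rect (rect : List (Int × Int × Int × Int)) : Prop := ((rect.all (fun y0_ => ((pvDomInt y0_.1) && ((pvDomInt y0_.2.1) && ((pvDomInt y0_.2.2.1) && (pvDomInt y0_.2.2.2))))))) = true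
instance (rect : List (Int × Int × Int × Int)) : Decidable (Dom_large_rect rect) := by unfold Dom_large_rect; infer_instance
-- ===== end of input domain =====

-- B replaces A's indexed max-scan by a stable descending sort on area plus head selection
-- (objective: alternative); on lists whose areas are all <= 0 with a non-maximal first
-- element, A returns rect[0] (stale target=0) while B returns the first maximal rectangle (D_ below).


-- ===== PORT A =====
def large_rect (rect : List (Int × Int × Int × Int)) : Int × Int × Int × Int :=
  let st := (PySem.List.pyRange 0 (PySem.List.len rect) 1).foldl
    (fun (p : Int × Int) (i : Int) =>
      let area := (PySem.List.pyGetD rect i (0,0,0,0)).2.2.1 * (PySem.List.pyGetD rect i (0,0,0,0)).2.2.2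
      if p.1 < area then (area, i) else p)
    ((0 : Int), (0 : Int))
  let x := (PySem.List.pyGetD rect st.2 (0,0,0,0)).1
  let y := (PySem.List.pyGetD rect st.2 (0,0,0,0)).2.1
  let w := (PySem.List.pyGetD rect st.2 (0,0,0,0)).2.2.1
  let h := (PySem.List.pyGetD rect st.2 (0,0,0,0)).2.2.2
  (x, y, w, h)

-- ===== PORT B =====
def large_rect_alt (rect : List (Int × Int × Int × Int)) : Int × Int × Int × Int :=
  let s := PySem.List.sorted rect (fun r => r.2.2.1 * r.2.2.2) true
  let x := (PySem.List.pyGetD s 0 (0,0,0,0)).1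
  let y := (PySem.List.pyGetD s 0 (0,0,0,0)).2.1
  let w := (PySem.List.pyGetD s 0 (0,0,0,0)).2.2.1
  let h := (PySem.List.pyGetD s 0 (0,0,0,0)).2.2.2
  (x, y, w, h)

-- ===== PRECONDITION & SPEC =====
-- Pre_ excludes only the empty list, on which both Pythons raise IndexError.
def Pre_large_rect (rect : List (Int × Int × Int × Int)) : Prop := rect ≠ []
instance (rect : List (Int × Int × Int × Int)) : Decidable (Pre_large_rect rect) := by unfold Pre_large_rect; infer_instance
def pvWitness_large_rect : (List (Int × Int × Int × Int)) := [(1, 2, 3, 4)]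

-- on non-empty lists whose areas w*h are all ≤ 0 and whose first rectangle does not attain the
-- maximal area, A returns rect[0] (its target=0 initialisation is never overwritten because it
-- only updates on area > 0) while B returns the first rectangle of maximal area, the intended value.
def D_large_rect (rect : List (Int × Int × Int × Int)) : Prop :=
  ((!rect.isEmpty) &&
   rect.all (fun r => decide (r.2.2.1 * r.2.2.2 ≤ 0)) &&
   rect.any (fun r => decide ((rect.headI).2.2.1 * (rect.headI).2.2.2 < r.2.2.1 * r.2.2.2))) = true
instance (rect : List (Int × Int × Int × Int)) : Decidable (D_large_rect rect) := by unfold D_large_rect; infer_instance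

def Spec_large_rect (rect : List (Int × Int × Int × Int)) (out : Int × Int × Int × Int) : Prop := ¬ D_large_rect rect → out = large_rect_alt rect
instance (rect : List (Int × Int × Int × Int)) (out : Int × Int × Int × Int) : Decidable (Spec_large_rect rect out) := by unfold Spec_large_rect; infer_instance

def pvDiffWitness_large_rect : (List (Int × Int × Int × Int)) := [(0, 0, 1, -1), (5, 5, 0, 0)]
def pvDiffWitnessOut_large_rect : (Int × Int × Int × Int) × (Int × Int × Int × Int) := ((0, 0, 1, -1), (5, 5, 0, 0))

-- ===== CLAIM (what is proved, stated in full; the proofs are below) =====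
def Claim_unchanged_large_rect : Prop := ∀ (rect : List (Int × Int × Int × Int)), Dom_large_rect rect → Pre_large_rect rect → Spec_large_rect rect (large_rect rect)
def Claim_changed_large_rect : Prop := Dom_large_rect (pvDiffWitness_large_rect) ∧ Pre_large_rect (pvDiffWitness_large_rect) ∧ D_large_rect (pvDiffWitness_large_rect) ∧ large_rect (pvDiffWitness_large_rect) = pvDiffWitnessOut_large_rect.1 ∧ large_rect_alt (pvDiffWitness_large_rect) = pvDiffWitnessOut_large_rect.2 ∧ pvDiffWitnessOut_large_rect.1 ≠ pvDiffWitnessOut_large_rect.2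
def Claim_exact_large_rect : Prop := ∀ (rect : List (Int × Int × Int × Int)), Dom_large_rect rect → Pre_large_rect rect → D_large_rect rect → large_rect rect ≠ large_rect_alt rect

-- ===== LEMMAS AND PROOFS =====

lemma D_iff (rect : List (Int × Int × Int × Int)) :
    D_large_rect rect ↔
      (rect ≠ [] ∧ (∀ r ∈ rect, r.2.2.1 * r.2.2.2 ≤ 0) ∧
        (∃ r ∈ rect, (rect.headI).2.2.1 * (rect.headI).2.2.2 < r.2.2.1 * r.2.2.2)) := by
  simp [D_large_rect, List.all_eq_true, List.any_eq_true, and_assoc]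

-- area of a rectangle
def pvAr (r : Int × Int × Int × Int) : Int := r.2.2.1 * r.2.2.2

-- first element of maximal area in b :: ys (strict-greater scan keeps the earliest maximum)
def pvBest (b : Int × Int × Int × Int) (ys : List (Int × Int × Int × Int)) : Int × Int × Int × Int :=
  ys.foldl (fun c x => if pvAr c < pvAr x then x else c) b

lemma pvBest_isMax : ∀ (ys : List (Int × Int × Int × Int)) (b : Int × Int × Int × Int),
    ∀ x ∈ b :: ys, pvAr x ≤ pvAr (pvBest b ys) := by
  intro ys
  induction ys with
  | nil => intro b x hx; rw [List.mem_singleton] at hx; subst hx; exact le_refl _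
  | cons y t ih =>
    intro b x hx
    have hb' : pvAr b ≤ pvAr (if pvAr b < pvAr y then y else b) ∧
        pvAr y ≤ pvAr (if pvAr b < pvAr y then y else b) := by
      by_cases h : pvAr b < pvAr y
      · rw [if_pos h]; exact ⟨le_of_lt h, le_refl _⟩
      · rw [if_neg h]; exact ⟨le_refl _, not_lt.mp h⟩
    have hh : pvAr (if pvAr b < pvAr y then y else b) ≤
        pvAr (pvBest (if pvAr b < pvAr y then y else b) t) :=
      ih _ _ List.mem_cons_self
    have hbsteq : pvBest b (y :: t) = pvBest (if pvAr b < pvAr y then y else b) t := by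
      simp [pvBest]
    rw [hbsteq]
    rcases List.mem_cons.mp hx with rfl | hx
    · exact le_trans hb'.1 hh
    · rcases List.mem_cons.mp hx with rfl | hx
      · exact le_trans hb'.2 hh
      · exact ih _ _ (List.mem_cons_of_mem _ hx)

lemma pvBest_mem : ∀ (ys : List (Int × Int × Int × Int)) (b : Int × Int × Int × Int),
    pvBest b ys ∈ b :: ys := by
  intro ys
  induction ys with
  | nil => intro b; simp [pvBest]
  | cons y t ih =>
    intro b
    have hbsteq : pvBest b (y :: t) = pvBest (if pvAr b < pvAr y then y else b) t := by
      simp [pvBest]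
    rw [hbsteq]
    rcases List.mem_cons.mp (ih (if pvAr b < pvAr y then y else b)) with h | h
    · rw [h]
      by_cases hc : pvAr b < pvAr y
      · rw [if_pos hc]; exact List.mem_cons_of_mem _ List.mem_cons_self
      · rw [if_neg hc]; exact List.mem_cons_self
    · exact List.mem_cons_of_mem _ (List.mem_cons_of_mem _ h)

lemma pvBest_eq_self : ∀ (ys : List (Int × Int × Int × Int)) (b : Int × Int × Int × Int),
    (∀ x ∈ ys, pvAr x ≤ pvAr b) → pvBest b ys = b := by
  intro ys
  induction ys with
  | nil => intro b _; rfl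
  | cons y t ih =>
    intro b h
    have hy : ¬ pvAr b < pvAr y := not_lt.mpr (h y (by simp))
    simp only [pvBest, List.foldl_cons, if_neg hy]
    exact ih b (fun x hx => h x (by simp [hx]))

-- head of the insertion-sort fold: inserting left to right, the head is the strict-greater scan
lemma head?_foldl_insertBy {α : Type} (before : α → α → Bool) :
    ∀ (ys : List α) (b : α) (t : List α),
      ((ys.foldl (fun acc x => PySem.List.insertBy before x acc) (b :: t))).head? =
        some (ys.foldl (fun c x => if before x c then x else c) b) := by
  intro ys
  induction ys with
  | nil => intro b t; rfl
  | cons x ys ih =>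
    intro b t
    simp only [List.foldl_cons]
    by_cases hx : before x b
    · rw [show PySem.List.insertBy before x (b :: t) = x :: b :: t by
        simp [PySem.List.insertBy, hx]]
      rw [ih x (b :: t)]; simp [hx]
    · rw [show PySem.List.insertBy before x (b :: t) = b :: PySem.List.insertBy before x t by
        simp [PySem.List.insertBy, hx]]
      rw [ih b _]; simp [hx]

-- B on a non-empty list returns the first rectangle of maximal area
lemma B_char (r0 : Int × Int × Int × Int) (rs : List (Int × Int × Int × Int)) :
    large_rect_alt (r0 :: rs) = pvBest r0 rs := by
  have hs : (PySem.List.sorted (r0 :: rs) (fun r => r.2.2.1 * r.2.2.2) true).head? =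
      some (pvBest r0 rs) := by
    rw [PySem.List.sorted_rev_eq_foldl_insertBy]
    simp only [List.foldl_cons]
    rw [show PySem.List.insertBy (fun a b => decide (b.2.2.1 * b.2.2.2 < a.2.2.1 * a.2.2.2)) r0 [] = [r0] from rfl]
    rw [head?_foldl_insertBy]
    congr 1
    simp only [pvBest, pvAr]
    congr 1
    funext c x
    by_cases h : c.2.2.1 * c.2.2.2 < x.2.2.1 * x.2.2.2 <;> simp [h]
  obtain ⟨t, ht⟩ : ∃ t, PySem.List.sorted (r0 :: rs) (fun r => r.2.2.1 * r.2.2.2) true =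
      pvBest r0 rs :: t := by
    cases hse : PySem.List.sorted (r0 :: rs) (fun r => r.2.2.1 * r.2.2.2) true with
    | nil => rw [hse] at hs; simp at hs
    | cons u v => rw [hse] at hs; simp at hs; exact ⟨v, by rw [hs]⟩
  simp [large_rect_alt, ht, PySem.List.pyGetD_zero_cons]

-- invariant of A's loop over the remaining indices k, k+1, …
lemma loopA : ∀ (ys rect : List (Int × Int × Int × Int)) (d : Int × Int × Int × Int) (k : Nat),
    rect.drop k = ys →
    ∀ (la tg : Int) (e : Int × Int × Int × Int),
    (0 < pvAr e → la = pvAr e ∧ ∃ j : Nat, tg = (j : Int) ∧ rect.getD j d = e) →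
    (pvAr e ≤ 0 → la = 0 ∧ tg = 0) →
    ((0 < pvAr (pvBest e ys) →
        ((List.range' k ys.length).foldl
          (fun (p : Int × Int) (i : Nat) =>
            if p.1 < pvAr (rect.getD i d) then (pvAr (rect.getD i d), (i : Int)) else p) (la, tg)).1
          = pvAr (pvBest e ys) ∧
        ∃ j : Nat,
          ((List.range' k ys.length).foldl
            (fun (p : Int × Int) (i : Nat) =>
              if p.1 < pvAr (rect.getD i d) then (pvAr (rect.getD i d), (i : Int)) else p) (la, tg)).2
            = (j : Int) ∧ rect.getD j d = pvBest e ys) ∧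
      (pvAr (pvBest e ys) ≤ 0 →
        ((List.range' k ys.length).foldl
          (fun (p : Int × Int) (i : Nat) =>
            if p.1 < pvAr (rect.getD i d) then (pvAr (rect.getD i d), (i : Int)) else p) (la, tg))
          = (0, 0))) := by
  intro ys
  induction ys with
  | nil =>
    intro rect d k _ la tg e h1 h2
    constructor
    · intro hp; simpa [pvBest] using h1 hp
    · intro hp
      obtain ⟨hla, htg⟩ := h2 (by simpa [pvBest] using hp)
      simp [hla, htg]
  | cons x ys ih =>
    intro rect d k hdrop la tg e h1 h2
    have hx : rect.getD k d = x := by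
      have hk : rect[k]? = some x := by
        have : (rect.drop k).head? = some x := by rw [hdrop]; rfl
        rwa [List.head?_drop] at this
      simp [List.getD, hk]
    have hdrop' : rect.drop (k + 1) = ys := by
      have : rect.drop (k + 1) = (rect.drop k).drop 1 := by
        rw [List.drop_drop]
      rw [this, hdrop]; rfl
    have hrange : List.range' k (x :: ys).length = k :: List.range' (k + 1) ys.length := by
      simp [List.range'_succ]
    rw [hrange]
    simp only [List.foldl_cons, hx]
    have hbest : pvBest e (x :: ys) = pvBest (if pvAr e < pvAr x then x else e) ys := by
      simp [pvBest]
    rw [hbest]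
    by_cases hex : pvAr e < pvAr x
    · rw [if_pos hex]
      by_cases hxp : 0 < pvAr x
      · have hla : la < pvAr x := by
          rcases le_or_gt (pvAr e) 0 with he0 | he0
          · obtain ⟨hla, _⟩ := h2 he0; omega
          · obtain ⟨hla, _⟩ := h1 he0; omega
        rw [if_pos hla]
        exact ih rect d (k + 1) hdrop' (pvAr x) (k : Int) x
          (fun _ => ⟨rfl, k, rfl, hx⟩) (fun h => absurd hxp (by omega))
      · have he0 : pvAr e ≤ 0 := by omega
        obtain ⟨hla, htg⟩ := h2 he0
        rw [hla, htg, if_neg (by omega)]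
        exact ih rect d (k + 1) hdrop' 0 0 x
          (fun h => absurd hxp (by omega)) (fun _ => ⟨rfl, rfl⟩)
    · rw [if_neg hex]
      have hstay : ¬ la < pvAr x := by
        rcases le_or_gt (pvAr e) 0 with he0 | he0
        · obtain ⟨hla, _⟩ := h2 he0; omega
        · obtain ⟨hla, _⟩ := h1 he0; omega
      rw [if_neg hstay]
      exact ih rect d (k + 1) hdrop' la tg e h1 h2

-- A on a non-empty list: the first maximal rectangle if its area is positive, else rect[0]
lemma A_char (r0 : Int × Int × Int × Int) (rs : List (Int × Int × Int × Int)) :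
    large_rect (r0 :: rs) =
      (if 0 < pvAr (pvBest r0 rs) then pvBest r0 rs else r0) := by
  have hlen : PySem.List.len (r0 :: rs) = ((rs.length + 1 : Nat) : Int) := by
    simp [PySem.List.len_eq]
  have hfold :
      ((PySem.List.pyRange 0 (PySem.List.len (r0 :: rs)) 1).foldl
        (fun (p : Int × Int) (i : Int) =>
          let area := (PySem.List.pyGetD (r0 :: rs) i (0,0,0,0)).2.2.1 *
                      (PySem.List.pyGetD (r0 :: rs) i (0,0,0,0)).2.2.2
          if p.1 < area then (area, i) else p)
        ((0 : Int), (0 : Int)))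
      = ((List.range' 0 (rs.length + 1)).foldl
          (fun (p : Int × Int) (i : Nat) =>
            if p.1 < pvAr ((r0 :: rs).getD i (0,0,0,0)) then
              (pvAr ((r0 :: rs).getD i (0,0,0,0)), (i : Int)) else p)
          ((0 : Int), (0 : Int))) := by
    rw [hlen, PySem.List.pyRange_zero_natCast, List.foldl_map, List.range_eq_range']
    simp [PySem.List.pyGetD_natCast, pvAr]
  set step := fun (p : Int × Int) (i : Nat) =>
    if p.1 < pvAr ((r0 :: rs).getD i (0,0,0,0)) then
      (pvAr ((r0 :: rs).getD i (0,0,0,0)), (i : Int)) else p with hstep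
  have hrange : List.range' 0 (rs.length + 1) = 0 :: List.range' 1 rs.length := by
    simp [List.range'_succ]
  have hget0 : (r0 :: rs).getD 0 (0,0,0,0) = r0 := rfl
  have hinv := loopA rs (r0 :: rs) (0,0,0,0) 1 (by rfl)
  have hst :
      ((List.range' 0 (rs.length + 1)).foldl step ((0 : Int), (0 : Int)))
      = ((List.range' 1 rs.length).foldl step
          (if (0 : Int) < pvAr r0 then (pvAr r0, (0 : Int)) else ((0 : Int), (0 : Int)))) := by
    rw [hrange]; simp only [List.foldl_cons, hstep, hget0, Nat.cast_zero]
  have hmain :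
      (0 < pvAr (pvBest r0 rs) →
        ((List.range' 0 (rs.length + 1)).foldl step ((0:Int),(0:Int))).1 = pvAr (pvBest r0 rs) ∧
        ∃ j : Nat, ((List.range' 0 (rs.length + 1)).foldl step ((0:Int),(0:Int))).2 = (j : Int) ∧
          (r0 :: rs).getD j (0,0,0,0) = pvBest r0 rs) ∧
      (pvAr (pvBest r0 rs) ≤ 0 →
        ((List.range' 0 (rs.length + 1)).foldl step ((0:Int),(0:Int))) = (0, 0)) := by
    rw [hst]
    by_cases hp : (0 : Int) < pvAr r0
    · rw [if_pos hp]
      exact hinv (pvAr r0) 0 r0 (fun _ => ⟨rfl, 0, rfl, rfl⟩) (fun h => absurd hp (by omega))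
    · rw [if_neg hp]
      exact hinv 0 0 r0 (fun h => absurd hp (by omega)) (fun _ => ⟨rfl, rfl⟩)
  have hA0 : large_rect (r0 :: rs) =
      PySem.List.pyGetD (r0 :: rs)
        (((PySem.List.pyRange 0 (PySem.List.len (r0 :: rs)) 1).foldl
          (fun (p : Int × Int) (i : Int) =>
            let area := (PySem.List.pyGetD (r0 :: rs) i (0,0,0,0)).2.2.1 *
                        (PySem.List.pyGetD (r0 :: rs) i (0,0,0,0)).2.2.2
            if p.1 < area then (area, i) else p)
          ((0 : Int), (0 : Int))).2) (0,0,0,0) := rfl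
  rw [hA0, hfold]
  by_cases hb : 0 < pvAr (pvBest r0 rs)
  · obtain ⟨_, j, hj, hgj⟩ := hmain.1 hb
    rw [if_pos hb, hj]
    simp only [PySem.List.pyGetD_natCast]
    exact hgj
  · have h0 := hmain.2 (by omega)
    rw [if_neg hb, h0]
    simp [PySem.List.pyGetD_zero_cons]

-- ===== VERDICT (by name: the statement is the Claim_ definition above) =====
theorem large_rect_spec : Claim_unchanged_large_rect := by
  intro rect _ hpre hnd
  cases rect with
  | nil => exact absurd rfl hpre
  | cons r0 rs =>
    rw [B_char, A_char]
    by_cases hb : 0 < pvAr (pvBest r0 rs)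
    · rw [if_pos hb]
    · rw [if_neg hb]
      have hall : ∀ r ∈ r0 :: rs, r.2.2.1 * r.2.2.2 ≤ 0 := by
        intro r hr
        have := pvBest_isMax rs r0 r hr
        simp only [pvAr] at this hb ⊢
        omega
      rw [D_iff] at hnd
      push Not at hnd
      have hle : ∀ r ∈ r0 :: rs, pvAr r ≤ pvAr r0 := by
        intro r hr
        have := hnd (by simp) hall r hr
        simpa [pvAr, List.headI] using this
      exact (pvBest_eq_self rs r0 (fun x hx => hle x (by simp [hx]))).symm

theorem large_rect_changed : Claim_changed_large_rect := by
  unfold Claim_changed_large_rect; decide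

theorem large_rect_tight : Claim_exact_large_rect := by
  intro rect _ hpre hd
  cases rect with
  | nil => exact absurd rfl hpre
  | cons r0 rs =>
    obtain ⟨_, hall, r, hr, hlt⟩ := (D_iff _).mp hd
    simp only [List.headI] at hlt
    rw [B_char, A_char]
    have hb : pvAr (pvBest r0 rs) ≤ 0 := by
      have hmem := pvBest_mem rs r0
      have := hall _ hmem
      simpa [pvAr] using this
    rw [if_neg (by omega)]
    intro heq
    have h1 : pvAr r ≤ pvAr (pvBest r0 rs) := pvBest_isMax rs r0 r hr
    rw [← heq] at h1
    simp only [pvAr] at h1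
    omega
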